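-- pv_equiv track=rewrite | github.com/dylan-murray/sigil | sigil/core/tools.py | paginate_lines
-- ===== SOURCE A (Python) =====
-- MAX_READ_LINES = 2000
--
-- MAX_READ_BYTES = 50_000
--
-- def paginate_lines(
--     all_lines: list[str],
--     offset: int = 1,
--     limit: int = MAX_READ_LINES,
-- ) -> str:
--     if not all_lines:
--         return ""
--
--     total_lines = len(all_lines)
--     start = max(0, offset - 1)
--     cap = min(limit, MAX_READ_LINES)
--     selected = all_lines[start : start + cap]
--
--     output_lines: list[str] = []
--     byte_count = 0
--     for line in selected:
--         byte_count += len(line.encode())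
--         if byte_count > MAX_READ_BYTES:
--             break
--         output_lines.append(line)
--
--     result = "".join(output_lines)
--     end_line = start + len(output_lines)
--
--     if end_line < total_lines:
--         if not result.endswith("\n"):
--             result += "\n"
--         result += (
--             f"[truncated — {total_lines} lines total. "
--             f"Use read_file with offset={end_line + 1} to continue.]"
--         )
--
--     return result
-- ===== SOURCE B (Python) =====
-- MAX_READ_LINES = 2000
--
-- MAX_READ_BYTES = 50_000
--
-- def paginate_lines(
--     all_lines: list[str],
--     offset: int = 1,
--     limit: int = MAX_READ_LINES,
-- ) -> str:
--     if len(all_lines) == 0: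
--         return ""
--
--     total_lines = len(all_lines)
--     start = offset - 1 if offset > 1 else 0
--     cap = MAX_READ_LINES if limit > MAX_READ_LINES else limit
--     selected = all_lines[start : start + cap]
--
--     # prefix table of cumulative encoded byte lengths
--     cum = []
--     running = 0
--     for line in selected:
--         running += len(line.encode())
--         cum.append(running)
--
--     # binary search for the first index whose cumulative total exceeds the cap;
--     # everything before that index fits within MAX_READ_BYTES
--     lo, hi = 0, len(cum)
--     while lo < hi:
--         mid = (lo + hi) // 2
--         if cum[mid] <= MAX_READ_BYTES:
--             lo = mid + 1
--         else:
--             hi = mid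
--     n = lo
--
--     body = "".join(selected[:n])
--     end_line = start + n
--     if end_line >= total_lines:
--         return body
--
--     sep = "" if body.endswith("\n") else "\n"
--     note = (
--         f"[truncated — {total_lines} lines total. "
--         f"Use read_file with offset={end_line + 1} to continue.]"
--     )
--     return body + sep + note
-- ===== Notes on version B (the rewrite author's own statement) =====
-- stated objective: alternative
-- what changed: Replaces A's accumulate-and-break loop with a prefix table of cumulative byte lengths plus a binary search for the first index exceeding the byte cap; the kept lines are then taken as one slice.
import Mathlib
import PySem

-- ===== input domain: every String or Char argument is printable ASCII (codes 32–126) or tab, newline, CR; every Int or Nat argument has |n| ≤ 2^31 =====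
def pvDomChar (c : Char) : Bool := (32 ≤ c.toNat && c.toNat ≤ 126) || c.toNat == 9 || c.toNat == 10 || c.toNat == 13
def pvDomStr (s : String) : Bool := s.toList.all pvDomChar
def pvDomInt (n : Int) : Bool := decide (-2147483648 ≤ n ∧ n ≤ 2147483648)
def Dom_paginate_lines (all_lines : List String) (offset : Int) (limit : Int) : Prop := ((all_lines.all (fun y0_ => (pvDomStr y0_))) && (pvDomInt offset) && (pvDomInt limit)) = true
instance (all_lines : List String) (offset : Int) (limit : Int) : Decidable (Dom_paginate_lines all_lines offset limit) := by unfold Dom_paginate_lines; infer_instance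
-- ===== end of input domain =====

-- B replaces A's accumulate-and-break loop by a prefix table of cumulative byte
-- lengths plus a binary search for the cutoff (objective: alternative decomposition).

-- ===== PORT A =====

def pvMaxReadLines : Int := 2000
def pvMaxReadBytes : Int := 50000

-- len(line.encode()): exact on the ASCII domain (every admitted char is 1 UTF-8 byte)
def pvByteLen (s : String) : Int := (PySem.Str.len s : Int)

-- A's trailing lines: join, endswith-newline fixup, truncation note (ported per A: two successive +=)
def pvFinish (total_lines : Int) (end_line : Int) (output_lines : List String) : String :=
  let result := PySem.Str.join "" output_lines
  if end_line < total_lines then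
    let result := if ¬ PySem.Str.endswith result "\n" then PySem.Str.join "" [result, "\n"] else result
    PySem.Str.join "" [result, "[truncated — ", PySem.Int.toStr total_lines,
      " lines total. Use read_file with offset=", PySem.Int.toStr (end_line + 1), " to continue.]"]
  else result

-- A's loop: byte_count += len(line.encode()); break when it exceeds the cap, else append
def pvLoopA : List String → Int → List String
  | [], _ => []
  | l :: rest, byte_count =>
    let byte_count := byte_count + pvByteLen l
    if byte_count > pvMaxReadBytes then []
    else l :: pvLoopA rest byte_count

def paginate_lines (all_lines : List String) (offset : Int) (limit : Int) : String :=
  if all_lines = [] then "" else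
  let total_lines : Int := all_lines.length
  let start := max 0 (offset - 1)
  let cap := min limit pvMaxReadLines
  let selected := PySem.List.slice all_lines (some start) (some (start + cap))
  let output_lines := pvLoopA selected 0
  pvFinish total_lines (start + output_lines.length) output_lines

-- ===== PORT B =====

-- prefix table of cumulative byte lengths
def pvCum : List String → Int → List Int
  | [], _ => []
  | l :: rest, running =>
    let running := running + pvByteLen l
    running :: pvCum rest running

-- hand-written binary search of Source B: first index whose cumulative total exceeds the cap
def pvBsearch (cum : List Int) (lo hi : Nat) : Nat :=
  if lo < hi then
    let mid := (lo + hi) / 2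
    if PySem.List.pyGetD cum (mid : Int) 0 ≤ pvMaxReadBytes then pvBsearch cum (mid + 1) hi
    else pvBsearch cum lo mid
  else lo
termination_by hi - lo
decreasing_by all_goals omega

def paginate_lines_alt (all_lines : List String) (offset : Int) (limit : Int) : String :=
  if all_lines.length = 0 then "" else
  let total_lines : Int := all_lines.length
  let start := if 1 < offset then offset - 1 else 0
  let cap := if pvMaxReadLines < limit then pvMaxReadLines else limit
  let selected := PySem.List.slice all_lines (some start) (some (start + cap))
  let cum := pvCum selected 0
  let n := pvBsearch cum 0 cum.length
  let body := PySem.Str.join "" (selected.take n)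
  let end_line := start + (n : Int)
  if end_line ≥ total_lines then body
  else
    let sep := if PySem.Str.endswith body "\n" then "" else "\n"
    let note := PySem.Str.join "" ["[truncated — ", PySem.Int.toStr total_lines,
      " lines total. Use read_file with offset=", PySem.Int.toStr (end_line + 1), " to continue.]"]
    PySem.Str.join "" [body, sep, note]

-- ===== PRECONDITION & SPEC =====
def Spec_paginate_lines (all_lines : List String) (offset : Int) (limit : Int) (out : String) : Prop := out = paginate_lines_alt all_lines offset limit
instance (all_lines : List String) (offset : Int) (limit : Int) (out : String) : Decidable (Spec_paginate_lines all_lines offset limit out) := by unfold Spec_paginate_lines; infer_instance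

-- ===== CLAIM (what is proved, stated in full; the proofs are below) =====
def Claim_equal_paginate_lines : Prop := ∀ (all_lines : List String) (offset : Int) (limit : Int), Dom_paginate_lines all_lines offset limit → Spec_paginate_lines all_lines offset limit (paginate_lines all_lines offset limit)

-- ===== LEMMAS AND PROOFS =====

-- every entry of the prefix table is at least the starting accumulator
lemma pvCum_ge {x : Int} : ∀ (ls : List String) (bc : Int), x ∈ pvCum ls bc → bc ≤ x := by
  intro ls
  induction ls with
  | nil => intro bc h; simp [pvCum] at h
  | cons l rest ih =>
    intro bc h
    simp only [pvCum, List.mem_cons] at h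
    have hb : (0:Int) ≤ pvByteLen l := by simp [pvByteLen]
    rcases h with h | h
    · omega
    · have := ih _ h; omega

-- the prefix table is nondecreasing
lemma pvCum_sorted : ∀ (ls : List String) (bc : Int), (pvCum ls bc).Pairwise (· ≤ ·) := by
  intro ls
  induction ls with
  | nil => intro bc; simp [pvCum]
  | cons l rest ih =>
    intro bc
    simp only [pvCum]
    exact List.pairwise_cons.2 ⟨fun x hx => pvCum_ge _ _ hx, ih _⟩

lemma pvCum_length : ∀ (ls : List String) (bc : Int), (pvCum ls bc).length = ls.length := by
  intro ls
  induction ls with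
  | nil => intro bc; simp [pvCum]
  | cons l rest ih => intro bc; simp [pvCum, ih]

-- A's loop keeps exactly the lines whose prefix sum stays within the cap
lemma pvLoopA_eq_take : ∀ (ls : List String) (bc : Int),
    pvLoopA ls bc = ls.take ((pvCum ls bc).takeWhile (· ≤ pvMaxReadBytes)).length := by
  intro ls
  induction ls with
  | nil => intro bc; simp [pvLoopA, pvCum]
  | cons l rest ih =>
    intro bc
    simp only [pvLoopA, pvCum]
    by_cases h : bc + pvByteLen l > pvMaxReadBytes
    · have : decide (bc + pvByteLen l ≤ pvMaxReadBytes) = false := by simp; omega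
      simp [h, this]
    · have : decide (bc + pvByteLen l ≤ pvMaxReadBytes) = true := by simp; omega
      simp [h, this, ih]

-- at the cutoff index the predicate fails (general takeWhile fact, derived from core lemmas)
lemma pvTakeWhile_getElem_cutoff (p : Int → Bool) (l : List Int) (t : Nat)
    (ht : t = (l.takeWhile p).length) (h : t < l.length) : p (l[t]'h) = false := by
  subst ht
  have hsplit : l.takeWhile p ++ l.dropWhile p = l := List.takeWhile_append_dropWhile
  have hlen : (l.takeWhile p).length + (l.dropWhile p).length = l.length := by
    rw [← List.length_append, hsplit]
  have hd : l.dropWhile p ≠ [] := by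
    intro hnil; rw [hnil] at hlen; simp at hlen; omega
  have h0 : l[(l.takeWhile p).length]'h
      = (l.takeWhile p ++ l.dropWhile p)[(l.takeWhile p).length]'(by rw [hsplit]; exact h) :=
    List.getElem_of_eq hsplit.symm h
  rw [h0, List.getElem_append_right (by omega)]
  simp only [Nat.sub_self]
  rw [← List.head_eq_getElem hd]
  exact List.head_dropWhile_not p hd

-- inside the cutoff the predicate holds
lemma pvTakeWhile_getElem_mem (p : Int → Bool) (l : List Int) (i : Nat)
    (hi : i < (l.takeWhile p).length) (h : i < l.length) : p (l[i]'h) = true := by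
  have he := (List.takeWhile_prefix (l := l) p).getElem hi
  exact he ▸ List.mem_takeWhile_imp (List.getElem_mem hi)

-- binary search on a nondecreasing table returns the takeWhile cutoff
lemma pvBsearch_eq_aux (cum : List Int) (hs : cum.Pairwise (· ≤ ·)) :
    ∀ (d lo hi : Nat), hi - lo ≤ d → hi ≤ cum.length →
      lo ≤ (cum.takeWhile (· ≤ pvMaxReadBytes)).length →
      (cum.takeWhile (· ≤ pvMaxReadBytes)).length ≤ hi →
      pvBsearch cum lo hi = (cum.takeWhile (· ≤ pvMaxReadBytes)).length := by
  intro d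
  induction d with
  | zero =>
    intro lo hi hd hhi hlo hhi2
    rw [pvBsearch]
    have : ¬ lo < hi := by omega
    simp only [this, if_false]
    omega
  | succ d ihd =>
    intro lo hi hd hhi hlo hhi2
    set t := (cum.takeWhile (· ≤ pvMaxReadBytes)).length with ht
    rw [pvBsearch]
    by_cases hlt : lo < hi
    · simp only [hlt, if_true]
      set mid := (lo + hi) / 2 with hmid
      have hmlo : lo ≤ mid := by omega
      have hmhi : mid < hi := by omega
      have hmlen : mid < cum.length := by omega
      have hget : PySem.List.pyGetD cum (mid : Int) 0 = cum[mid]'hmlen := by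
        rw [PySem.List.pyGetD_natCast]; exact List.getD_eq_getElem cum 0 hmlen
      by_cases hc : cum[mid]'hmlen ≤ pvMaxReadBytes
      · -- mid is within the cap: the cutoff lies strictly beyond mid
        have hmt : mid < t := by
          by_contra hcon
          have htlen : t < cum.length := by omega
          have hfail := pvTakeWhile_getElem_cutoff (fun x => decide (x ≤ pvMaxReadBytes)) cum t ht htlen
          have hle : cum[t]'htlen ≤ cum[mid]'hmlen := by
            rcases Nat.eq_or_lt_of_le (Nat.le_of_not_lt hcon) with he | hl
            · exact le_of_eq (by congr 1)
            · exact (List.pairwise_iff_getElem.1 hs) t mid htlen hmlen hl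
          simp only [decide_eq_false_iff_not] at hfail
          exact hfail (le_trans hle hc)
        rw [if_pos (by rw [hget]; exact hc)]
        exact ihd (mid + 1) hi (by omega) hhi (by omega) hhi2
      · -- mid exceeds the cap: the cutoff is at most mid
        have hmt : t ≤ mid := by
          by_contra hcon
          have hp := pvTakeWhile_getElem_mem (fun x => decide (x ≤ pvMaxReadBytes)) cum mid
            (by rw [← ht]; exact Nat.lt_of_not_le hcon) hmlen
          exact hc (by simpa using hp)
        rw [if_neg (by rw [hget]; exact hc)]
        exact ihd lo mid (by omega) (by omega) hlo hmt
    · simp only [hlt, if_false]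
      omega

-- A's note-appending tail equals B's body+sep+note form
lemma pvTail_eq (tl e : Int) (out : List String) :
    pvFinish tl e out =
      (if e ≥ tl then PySem.Str.join "" out
       else
         let body := PySem.Str.join "" out
         let sep := if PySem.Str.endswith body "\n" then "" else "\n"
         let note := PySem.Str.join "" ["[truncated — ", PySem.Int.toStr tl,
           " lines total. Use read_file with offset=", PySem.Int.toStr (e + 1), " to continue.]"]
         PySem.Str.join "" [body, sep, note]) := by
  unfold pvFinish
  by_cases h : e < tl
  · have h2 : ¬ e ≥ tl := by omega
    simp only [h, if_true, h2, if_false]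
    by_cases hw : PySem.Str.endswith (PySem.Str.join "" out) "\n"
    · simp only [hw, not_true, if_false, if_true]
      apply String.toList_inj.mp
      simp [PySem.Str.toList_join, PySem.Chars.join, List.intercalate]
    · simp only [hw]
      apply String.toList_inj.mp
      simp [PySem.Str.toList_join, PySem.Chars.join, List.intercalate]
  · have h2 : e ≥ tl := by omega
    simp only [h, if_false, h2, if_true]

-- ===== VERDICT (by name: the statement is the Claim_ definition above) =====
theorem paginate_lines_spec : Claim_equal_paginate_lines := by
  intro all_lines offset limit _
  unfold Spec_paginate_lines paginate_lines paginate_lines_alt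
  by_cases hnil : all_lines = []
  · simp [hnil]
  · have hlnil : ¬ all_lines.length = 0 := by simpa [List.length_eq_zero_iff] using hnil
    simp only [hnil, hlnil, if_false]
    have hstart : (if 1 < offset then offset - 1 else 0) = max 0 (offset - 1) := by
      split_ifs <;> omega
    have hcap : (if pvMaxReadLines < limit then pvMaxReadLines else limit) = min limit pvMaxReadLines := by
      rw [min_def]; split_ifs <;> omega
    rw [hstart, hcap]
    set start := max 0 (offset - 1) with hst
    set selected := PySem.List.slice all_lines (some start) (some (start + min limit pvMaxReadLines)) with hsel
    set cum := pvCum selected 0 with hcum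
    set t := (cum.takeWhile (· ≤ pvMaxReadBytes)).length with ht
    have htle : t ≤ cum.length := (List.takeWhile_prefix _).length_le
    have hb : pvBsearch cum 0 cum.length = t :=
      pvBsearch_eq_aux cum (pvCum_sorted _ _) cum.length 0 cum.length (by omega) le_rfl (by omega) htle
    have hl : pvLoopA selected 0 = selected.take t := pvLoopA_eq_take selected 0
    have hlen : (selected.take t).length = t := by
      rw [List.length_take]; rw [hcum, pvCum_length] at htle; omega
    rw [hb, hl, hlen, pvTail_eq]
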